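-- pv_equiv track=rewrite | github.com/TomatoFT/guess-word-challenge | utils/processing.py | transform_into_correct_word
-- ===== SOURCE A (Python) =====
-- def transform_into_correct_word(dict_items: dict, length_item: int) -> str:
--     """
--     Transform a dictionary of character positions into a word with underscores for missing positions.
--
--     This function takes a dictionary where keys are integer positions and values are characters,
--     along with the desired length of the output string. It constructs a string where characters
--     from the dictionary are placed at their corresponding positions, and underscores ('_') are
--     used for positions not present in the dictionary.
--
--     Args:
--         dict_items (dict): A dictionary mapping integer positions to characters
--         length_item (int): The desired length of the output string
--
--     Returns:
--         str: A string of length length_item containing characters from dict_items and underscores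
--
--     """
--     result = ""
--
--     for i in range(length_item):
--         if i in dict_items:
--             result= result + dict_items[i]
--         else:
--             result = result + "_"
--
--     return result
-- ===== SOURCE B (Python) =====
-- def transform_into_correct_word(dict_items: dict, length_item: int) -> str:
--     """Fill-then-patch: start from all underscores, place each dict entry at its position."""
--     result = ['_'] * length_item
--     for pos, ch in dict_items.items():
--         if 0 <= pos < length_item:
--             result[pos] = ch
--     return ''.join(result)
-- ===== Notes on version B (the rewrite author's own statement) =====
-- stated objective: alternative
-- what changed: Instead of scanning every position 0..length_item-1 with a membership test and growing a string, B allocates a list of underscores and patches it by iterating over the dict's items (ignoring out-of-range keys), then joins; Pre_ excludes only association lists with duplicate position keys, which do not represent any Python dict (every real dict input is admitted).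
import Mathlib
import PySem

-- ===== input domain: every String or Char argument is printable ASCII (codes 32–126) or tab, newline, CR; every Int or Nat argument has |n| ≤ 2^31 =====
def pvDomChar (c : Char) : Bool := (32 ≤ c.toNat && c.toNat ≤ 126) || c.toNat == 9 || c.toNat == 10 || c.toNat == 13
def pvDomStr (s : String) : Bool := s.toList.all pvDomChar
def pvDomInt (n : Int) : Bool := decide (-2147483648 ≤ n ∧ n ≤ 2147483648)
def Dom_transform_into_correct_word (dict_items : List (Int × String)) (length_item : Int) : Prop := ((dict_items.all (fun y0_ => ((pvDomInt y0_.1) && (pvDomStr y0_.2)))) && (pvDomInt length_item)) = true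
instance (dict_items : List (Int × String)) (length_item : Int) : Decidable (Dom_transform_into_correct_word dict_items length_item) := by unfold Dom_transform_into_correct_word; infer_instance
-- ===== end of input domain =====

-- B replaces A's scan-every-position-with-membership-test by fill-underscores-then-patch-from-the-dict; alternative decomposition, same cost.


-- ===== PORT A =====
-- dict lookup on the association-list encoding (first match = Python dict semantics)
def dictGet? : List (Int × String) → Int → Option String
  | [], _ => none
  | (k, v) :: t, i => if k = i then some v else dictGet? t i

-- literal port of A: for i in range(length_item): result += dict_items[i] if i in dict_items else "_"
def transform_into_correct_word (dict_items : List (Int × String)) (length_item : Int) : String :=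
  (PySem.List.pyRange 0 length_item 1).foldl
    (fun result i =>
      match dictGet? dict_items i with
      | some v => result ++ v
      | none => result ++ "_") ""

-- ===== PORT B =====
-- literal port of B: result = ['_'] * length_item; patch result[pos] = ch for in-range keys; ''.join
def transform_into_correct_word_alt (dict_items : List (Int × String)) (length_item : Int) : String :=
  PySem.Str.join ""
    (dict_items.foldl
      (fun res kv => if 0 ≤ kv.1 ∧ kv.1 < length_item then res.set kv.1.toNat kv.2 else res)
      (List.replicate length_item.toNat "_"))

-- ===== PRECONDITION & SPEC =====
-- Pre_ excludes association lists with duplicate position keys: they do not represent any Python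
-- dict, and on them A's first-match lookup and B's last-write-wins patching are both accidental.
def Pre_transform_into_correct_word (dict_items : List (Int × String)) (length_item : Int) : Prop :=
  (dict_items.map Prod.fst).Nodup

instance (dict_items : List (Int × String)) (length_item : Int) : Decidable (Pre_transform_into_correct_word dict_items length_item) := by unfold Pre_transform_into_correct_word; infer_instance

def pvWitness_transform_into_correct_word : (List (Int × String)) × Int := ([(0, "a"), (2, "c"), (5, "z")], 3)

def Spec_transform_into_correct_word (dict_items : List (Int × String)) (length_item : Int) (out : String) : Prop := out = transform_into_correct_word_alt dict_items length_item
instance (dict_items : List (Int × String)) (length_item : Int) (out : String) : Decidable (Spec_transform_into_correct_word dict_items length_item out) := by unfold Spec_transform_into_correct_word; infer_instance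

-- ===== CLAIM (what is proved, stated in full; the proofs are below) =====
def Claim_equal_transform_into_correct_word : Prop := ∀ (dict_items : List (Int × String)) (length_item : Int), Dom_transform_into_correct_word dict_items length_item → Pre_transform_into_correct_word dict_items length_item → Spec_transform_into_correct_word dict_items length_item (transform_into_correct_word dict_items length_item)

-- ===== LEMMAS AND PROOFS =====

-- ''.join is flattening
lemma join_nil_flatten (l : List (List Char)) : PySem.Chars.join [] l = l.flatten := by
  induction l with
  | nil => simp [PySem.Chars.join, List.intercalate]
  | cons a t ih =>
    cases t with
    | nil => simp [PySem.Chars.join, List.intercalate]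
    | cons b u =>
      rw [PySem.Chars.join_cons_cons]
      simp [List.flatten, ih]

lemma join_empty_cons (x : String) (xs : List String) :
    PySem.Str.join "" (x :: xs) = x ++ PySem.Str.join "" xs := by
  simp only [PySem.Str.join, String.toList_empty, List.map_cons, join_nil_flatten,
    List.flatten_cons, String.ofList_append, String.ofList_toList]

-- A's loop, as a join of per-position pieces
lemma fold_append_join (g : Nat → String) : ∀ (l : List Nat) (s : String),
    l.foldl (fun r k => r ++ g k) s = s ++ PySem.Str.join "" (l.map g) := by
  intro l
  induction l with
  | nil => intro s; simp [PySem.Str.join]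
  | cons a t ih =>
    intro s
    simp only [List.foldl_cons, List.map_cons, ih, join_empty_cons, String.append_assoc]

-- B's patch loop preserves length
lemma patch_length (n : Int) : ∀ (d : List (Int × String)) (acc : List String),
    (d.foldl (fun res kv => if 0 ≤ kv.1 ∧ kv.1 < n then res.set kv.1.toNat kv.2 else res) acc).length = acc.length := by
  intro d
  induction d with
  | nil => intro acc; rfl
  | cons kv t ih =>
    intro acc
    simp only [List.foldl_cons, ih]
    split <;> simp

-- lookup misses when the key is absent
lemma dictGet?_eq_none_of_not_mem : ∀ (d : List (Int × String)) (i : Int),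
    i ∉ d.map Prod.fst → dictGet? d i = none := by
  intro d
  induction d with
  | nil => intro i _; rfl
  | cons kv t ih =>
    intro i hi
    simp only [List.map_cons, List.mem_cons, not_or] at hi
    obtain ⟨kv1, kv2⟩ := kv
    simp only [dictGet?, if_neg (by simpa using (Ne.symm hi.1)), ih i hi.2]

-- element j of B's patched list is the dict lookup at j, defaulting to the old entry
lemma patch_getElem (n : Int) : ∀ (d : List (Int × String)), (d.map Prod.fst).Nodup →
    ∀ (acc : List String), acc.length = n.toNat → ∀ (j : Nat) (hj : j < acc.length),
    (d.foldl (fun res kv => if 0 ≤ kv.1 ∧ kv.1 < n then res.set kv.1.toNat kv.2 else res) acc)[j]'(by rw [patch_length]; exact hj)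
      = (dictGet? d (j : Int)).getD (acc[j]'hj) := by
  intro d
  induction d with
  | nil => intro _ acc _ j hj; rfl
  | cons kv t ih =>
    intro hnd acc hlen j hj
    obtain ⟨k, v⟩ := kv
    simp only [List.map_cons, List.nodup_cons] at hnd
    simp only [List.foldl_cons]
    split_ifs with hguard
    · have hset : (acc.set k.toNat v).length = n.toNat := by simpa using hlen
      rw [ih hnd.2 _ hset j (by simpa [hset, ← hlen] using hj)]
      by_cases hk : k = (j : Int)
      · rw [dictGet?_eq_none_of_not_mem t (j : Int) (by rw [← hk]; exact hnd.1)]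
        simp only [dictGet?, if_pos hk, Option.getD_some, Option.getD_none]
        have hkj : k.toNat = j := by omega
        subst hkj
        exact List.getElem_set_self (by simpa [← hlen] using hj)
      · simp only [dictGet?, if_neg hk]
        congr 1
        exact List.getElem_set_ne (by omega) (by simpa [← hlen] using hj)
    · rw [ih hnd.2 acc hlen j hj]
      have hk : k ≠ (j : Int) := by omega
      simp only [dictGet?, if_neg hk]

-- ===== VERDICT (by name: the statement is the Claim_ definition above) =====
theorem transform_into_correct_word_spec : Claim_equal_transform_into_correct_word := by
  intro d n _ hpre
  unfold Spec_transform_into_correct_word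
  have hmatch : ∀ (r : String) (i : Int),
      (match dictGet? d i with | some v => r ++ v | none => r ++ "_") = r ++ (dictGet? d i).getD "_" := by
    intro r i; cases dictGet? d i <;> rfl
  have hA : transform_into_correct_word d n
      = PySem.Str.join "" ((List.range n.toNat).map (fun (k : Nat) => (dictGet? d (k : Int)).getD "_")) := by
    unfold transform_into_correct_word
    rw [PySem.List.pyRange_one]
    rw [List.foldl_map]
    simp only [hmatch, sub_zero, zero_add]
    rw [fold_append_join (fun k => (dictGet? d (k : Int)).getD "_") (List.range n.toNat) ""]
    simp only [String.empty_append]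
  have hB : (d.foldl (fun res kv => if 0 ≤ kv.1 ∧ kv.1 < n then res.set kv.1.toNat kv.2 else res)
        (List.replicate n.toNat "_"))
      = (List.range n.toNat).map (fun (k : Nat) => (dictGet? d (k : Int)).getD "_") := by
    apply List.ext_getElem
    · rw [patch_length]; simp
    · intro j h1 h2
      have hj : j < (List.replicate n.toNat "_").length := by
        rw [patch_length] at h1; exact h1
      rw [patch_getElem n d hpre (List.replicate n.toNat "_") (by simp) j hj]
      simp
  rw [hA]
  unfold transform_into_correct_word_alt
  rw [hB]
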